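-- pv_equiv track=rewrite | github.com/geektoni/concept-tagging-nn-spacy | data_analysis/data_analysis_utils.py | get_combined_representation
-- ===== SOURCE A (Python) =====
-- def get_combined_representation(phrase, lemmas, pos, concepts, ner=[]):
--     """
--     Generate a combined representation of the phrase,lemmas,pos,concepts and ner
--     :param phrase: current phrase
--     :param lemmas: current lemmas
--     :param pos: POS tags for the phrase
--     :param concepts: concepts for the phrase
--     :param ner: NER recognition for the phrase
--     :return: a concatenation of the previous elements as a list
--     """
--     result = []
--     if len(ner) != 0:
--         for v in zip(phrase, lemmas, pos, concepts, ner):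
--             result.append(v[0]+v[1]+v[2]+v[3]+v[4])
--     else:
--         for v in zip(phrase, lemmas, pos, concepts):
--             result.append(v[0]+v[1]+v[2]+v[3])
--     return result
-- ===== SOURCE B (Python) =====
-- def get_combined_representation(phrase, lemmas, pos, concepts, ner=[]):
--     """
--     Combine the parallel token columns by folding them pairwise: start from
--     the phrase column and repeatedly merge in the next column with a single
--     element-wise concatenation pass.  Successive pairwise zips truncate to the
--     common prefix length exactly as one simultaneous zip would, and string
--     concatenation is associative, so the result is identical.
--     """
--     acc = list(phrase)
--     columns = [lemmas, pos, concepts]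
--     if len(ner) != 0:
--         columns.append(ner)
--     for column in columns:
--         acc = [left + right for left, right in zip(acc, column)]
--     return acc
-- ===== Notes on version B (the rewrite author's own statement) =====
-- stated objective: alternative
-- what changed: Instead of one simultaneous fixed-arity zip per branch, B folds the columns pairwise: it starts from phrase as an accumulator list and merges each remaining column in its own element-wise concatenation pass (staged passes with an accumulator vs a single multi-way zip loop).
import Mathlib
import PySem

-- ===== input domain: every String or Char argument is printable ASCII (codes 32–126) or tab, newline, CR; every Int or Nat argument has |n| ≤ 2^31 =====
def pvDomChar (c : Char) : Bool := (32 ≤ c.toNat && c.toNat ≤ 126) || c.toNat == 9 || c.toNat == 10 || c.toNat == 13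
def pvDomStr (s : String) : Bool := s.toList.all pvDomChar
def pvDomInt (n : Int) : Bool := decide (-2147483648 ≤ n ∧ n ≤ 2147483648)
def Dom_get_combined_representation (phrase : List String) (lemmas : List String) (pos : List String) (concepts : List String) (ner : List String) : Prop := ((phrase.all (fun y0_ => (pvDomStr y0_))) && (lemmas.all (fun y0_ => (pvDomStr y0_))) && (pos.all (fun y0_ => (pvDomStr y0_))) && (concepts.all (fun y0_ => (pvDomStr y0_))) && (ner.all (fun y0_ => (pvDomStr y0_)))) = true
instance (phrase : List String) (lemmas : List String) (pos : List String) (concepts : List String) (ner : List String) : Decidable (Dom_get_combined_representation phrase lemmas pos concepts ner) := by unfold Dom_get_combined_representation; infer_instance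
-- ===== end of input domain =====

-- B folds the columns pairwise into an accumulator (one element-wise merge pass per
-- column) instead of A's two fixed-arity simultaneous zip loops; objective: alternative.

-- ===== PORT A =====
-- the 'for v in zip(phrase, lemmas, pos, concepts, ner): result.append(v[0]+...+v[4])' loop
def pvLoop5 : List String → List String → List String → List String → List String → List String
  | a :: as_, b :: bs, c :: cs, d :: ds, e :: es =>
      (a ++ b ++ c ++ d ++ e) :: pvLoop5 as_ bs cs ds es
  | _, _, _, _, _ => []

-- the 4-wide loop of the else branch
def pvLoop4 : List String → List String → List String → List String → List String
  | a :: as_, b :: bs, c :: cs, d :: ds =>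
      (a ++ b ++ c ++ d) :: pvLoop4 as_ bs cs ds
  | _, _, _, _ => []

def get_combined_representation (phrase : List String) (lemmas : List String) (pos : List String) (concepts : List String) (ner : List String) : List String :=
  if ner.length ≠ 0 then pvLoop5 phrase lemmas pos concepts ner
  else pvLoop4 phrase lemmas pos concepts

-- ===== PORT B =====
-- one merge pass: 'acc = [left + right for left, right in zip(acc, column)]'
def pvMerge (acc column : List String) : List String :=
  ((acc.zip column).map (fun lr => lr.1 ++ lr.2))

def get_combined_representation_alt (phrase : List String) (lemmas : List String) (pos : List String) (concepts : List String) (ner : List String) : List String :=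
  let columns := [lemmas, pos, concepts] ++ (if ner.length ≠ 0 then [ner] else [])
  columns.foldl pvMerge phrase

-- ===== PRECONDITION & SPEC =====
def Spec_get_combined_representation (phrase : List String) (lemmas : List String) (pos : List String) (concepts : List String) (ner : List String) (out : List String) : Prop := out = get_combined_representation_alt phrase lemmas pos concepts ner
instance (phrase : List String) (lemmas : List String) (pos : List String) (concepts : List String) (ner : List String) (out : List String) : Decidable (Spec_get_combined_representation phrase lemmas pos concepts ner out) := by unfold Spec_get_combined_representation; infer_instance

-- ===== CLAIM (what is proved, stated in full; the proofs are below) =====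
def Claim_equal_get_combined_representation : Prop := ∀ (phrase : List String) (lemmas : List String) (pos : List String) (concepts : List String) (ner : List String), Dom_get_combined_representation phrase lemmas pos concepts ner → Spec_get_combined_representation phrase lemmas pos concepts ner (get_combined_representation phrase lemmas pos concepts ner)

-- ===== LEMMAS AND PROOFS =====
theorem pvMerge_nil_right (a : List String) : pvMerge a [] = [] := by
  simp [pvMerge]

theorem pvMerge_nil_left (c : List String) : pvMerge [] c = [] := by
  simp [pvMerge]

theorem pvMerge_cons (x y : String) (xs ys : List String) :
    pvMerge (x :: xs) (y :: ys) = (x ++ y) :: pvMerge xs ys := by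
  simp [pvMerge]

theorem pvFold4_eq (p l o c : List String) :
    pvMerge (pvMerge (pvMerge p l) o) c = pvLoop4 p l o c := by
  induction p generalizing l o c with
  | nil => simp [pvMerge_nil_left, pvLoop4]
  | cons x xs ih =>
      cases l with
      | nil => simp [pvMerge_nil_right, pvMerge_nil_left, pvLoop4]
      | cons y ys =>
        cases o with
        | nil => simp [pvMerge_cons, pvMerge_nil_right, pvMerge_nil_left, pvLoop4]
        | cons z zs =>
          cases c with
          | nil => simp [pvMerge_cons, pvMerge_nil_right, pvLoop4]
          | cons w ws =>
              simp only [pvMerge_cons, pvLoop4, ih]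

theorem pvFold5_eq (p l o c n : List String) :
    pvMerge (pvMerge (pvMerge (pvMerge p l) o) c) n = pvLoop5 p l o c n := by
  induction p generalizing l o c n with
  | nil => simp [pvMerge_nil_left, pvLoop5]
  | cons x xs ih =>
      cases l with
      | nil => simp [pvMerge_nil_right, pvMerge_nil_left, pvLoop5]
      | cons y ys =>
        cases o with
        | nil => simp [pvMerge_cons, pvMerge_nil_right, pvMerge_nil_left, pvLoop5]
        | cons z zs =>
          cases c with
          | nil => simp [pvMerge_cons, pvMerge_nil_right, pvMerge_nil_left, pvLoop5]
          | cons w ws =>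
            cases n with
            | nil => simp [pvMerge_cons, pvMerge_nil_right, pvLoop5]
            | cons v vs =>
                simp only [pvMerge_cons, pvLoop5, ih]

-- ===== VERDICT (by name: the statement is the Claim_ definition above) =====
theorem get_combined_representation_spec : Claim_equal_get_combined_representation := by
  intro phrase lemmas pos concepts ner _
  unfold Spec_get_combined_representation get_combined_representation get_combined_representation_alt
  split_ifs with h
  · simp only [List.foldl, List.cons_append, List.nil_append]
    exact (pvFold5_eq phrase lemmas pos concepts ner).symm
  · simp only [List.foldl, List.append_nil]
    exact (pvFold4_eq phrase lemmas pos concepts).symm
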